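-- pv_equiv track=rewrite | github.com/Rhaegal222/Unical | Primo Anno/Fondamenti di Programmazione 1/EPLPAPS/Esercizi PDF/esercizio5.py | ricorsiva
-- ===== SOURCE A (Python) =====
-- def ricorsiva(x):
--     if x <= 0:
--         return False
--     elif x == 1:
--         return True
--     y = ((3*x)-2)//6
--     if y <= 0:
--         return False
--     elif y == 1:
--         return True
--     elif y > 1:
--         return ricorsiva(y)
-- ===== SOURCE B (Python) =====
-- def ricorsiva(x):
--     # Closed form: the recursion maps x to (x-1)//2 each step; it reaches 1
--     # (True) exactly when x+1 lies in [2*2^k, 3*2^k) for some k >= 0.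
--     if x <= 0:
--         return False
--     n = x + 1
--     j = n.bit_length() - 1
--     return 2 * n < 3 * (1 << j)
-- ===== Notes on version B (the rewrite author's own statement) =====
-- stated objective: alternative
-- what changed: Replaced the recursive descent x -> ((3x)-2)//6 by a closed-form test (answer is True iff x+1 lies in [2*2^k, 3*2^k) for some k) computed with one bit_length call; O(1) arithmetic instead of a chain of recursive calls, though both are too fast for a timing run to separate.
import Mathlib
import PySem

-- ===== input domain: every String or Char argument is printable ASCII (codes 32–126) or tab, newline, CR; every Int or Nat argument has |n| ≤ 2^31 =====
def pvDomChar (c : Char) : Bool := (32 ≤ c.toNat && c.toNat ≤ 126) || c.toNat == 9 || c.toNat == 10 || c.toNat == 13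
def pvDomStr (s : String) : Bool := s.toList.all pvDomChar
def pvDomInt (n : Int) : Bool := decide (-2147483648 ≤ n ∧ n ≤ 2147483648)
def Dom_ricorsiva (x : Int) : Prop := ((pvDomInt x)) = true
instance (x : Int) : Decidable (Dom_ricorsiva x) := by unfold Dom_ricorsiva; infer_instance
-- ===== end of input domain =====

-- B replaces A's recursive descent by a closed-form test via bit_length (a different algorithm; constant arithmetic instead of the recursion).

-- ===== PORT A =====
-- literal transliteration of A; the final Python branch 'elif y > 1' is exhaustive
-- for integers after 'y <= 0' and 'y == 1', so the implicit 'return None' is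
-- unreachable; we put 'false' there.
def ricorsiva (x : Int) : Bool :=
  if x ≤ 0 then false
  else if x = 1 then true
  else
    let y := PySem.Int.floordiv (3 * x - 2) 6
    if y ≤ 0 then false
    else if y = 1 then true
    else if y > 1 then ricorsiva y
    else false
termination_by x.toNat
decreasing_by
  rw [PySem.Int.floordiv_eq_ediv_of_pos (by norm_num)] at *
  omega

-- ===== PORT B =====
-- n.bit_length() - 1 for n ≥ 2 is Nat.log2 n.
def ricorsiva_alt (x : Int) : Bool :=
  if x ≤ 0 then false
  else
    let n := (x + 1).toNat
    let j := Nat.log2 n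
    decide (2 * n < 3 * 2 ^ j)

-- ===== PRECONDITION & SPEC =====
def Spec_ricorsiva (x : Int) (out : Bool) : Prop := out = ricorsiva_alt x
instance (x : Int) (out : Bool) : Decidable (Spec_ricorsiva x out) := by unfold Spec_ricorsiva; infer_instance

-- ===== CLAIM (what is proved, stated in full; the proofs are below) =====
def Claim_equal_ricorsiva : Prop := ∀ (x : Int), Dom_ricorsiva x → Spec_ricorsiva x (ricorsiva x)

-- ===== LEMMAS AND PROOFS =====

-- floor division by the positive constant 6 as Euclidean division (so omega can reason about it)
theorem floordiv6 (a : Int) : PySem.Int.floordiv a 6 = a / 6 :=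
  PySem.Int.floordiv_eq_ediv_of_pos (by norm_num)

-- unfold one step of A for x >= 2
theorem ricorsiva_step (x : Int) (h2 : 2 <= x) :
    ricorsiva x =
      (let y := (3 * x - 2) / 6
       if y <= 0 then false
       else if y = 1 then true
       else if y > 1 then ricorsiva y
       else false) := by
  rw [ricorsiva.eq_def]
  have h1 : ¬ x <= 0 := by omega
  have h2' : ¬ x = 1 := by omega
  simp only [h1, h2', if_false, floordiv6]

-- log2 recurrence: for 2 <= n, log2 n = log2 (n / 2) + 1
theorem log2_succ (n : Nat) (h : 2 <= n) : Nat.log2 n = Nat.log2 (n / 2) + 1 := by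
  rw [Nat.log2_def]
  simp [h]

-- the closed-form predicate is invariant under n -> n / 2 for n >= 4
theorem closed_step (n : Nat) (h : 4 <= n) :
    (2 * (n / 2) < 3 * 2 ^ Nat.log2 (n / 2)) ↔ (2 * n < 3 * 2 ^ Nat.log2 n) := by
  rw [log2_succ n (by omega)]
  have hj : 1 <= Nat.log2 (n / 2) := by
    have h2 : (2:Nat) ^ 1 <= n / 2 := by omega
    exact (Nat.le_log2 (by omega)).mpr h2
  obtain ⟨k, hk⟩ : ∃ k, Nat.log2 (n / 2) = k + 1 := ⟨Nat.log2 (n / 2) - 1, by omega⟩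
  rw [hk, pow_succ, pow_succ]
  have hp : 1 <= (2:Nat) ^ k := Nat.one_le_two_pow
  omega

-- main equivalence, by strong induction on x.toNat
theorem ricorsiva_eq (x : Int) : ricorsiva x = ricorsiva_alt x := by
  generalize hfuel : x.toNat = fuel
  induction fuel using Nat.strong_induction_on generalizing x with
  | _ fuel ih =>
    by_cases hx0 : x <= 0
    · rw [ricorsiva.eq_def, ricorsiva_alt]; simp [hx0]
    · by_cases hx1 : x = 1
      · subst hx1; rw [ricorsiva.eq_def]; decide
      · have h2 : 2 <= x := by omega
        rw [ricorsiva_step x h2]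
        set y := (3 * x - 2) / 6 with hy
        by_cases hy0 : y <= 0
        · -- only x = 2 reaches this branch when 2 <= x
          have hx2 : x = 2 := by omega
          subst hx2; simp only [hy0, if_true]; decide
        · by_cases hy1 : y = 1
          · -- x = 3 or x = 4
            have hx34 : x = 3 ∨ x = 4 := by omega
            rcases hx34 with h | h <;> subst h <;> simp only [hy1, if_true] <;> decide
          · have hygt : y > 1 := by omega
            simp only [hy0, hy1, hygt, if_true, if_false]
            rw [ih y.toNat (by omega) y rfl]
            -- show the closed form is invariant: ricorsiva_alt y = ricorsiva_alt x
            have hx5 : 5 <= x := by omega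
            rw [ricorsiva_alt, ricorsiva_alt]
            have hxn : ¬ x <= 0 := by omega
            have hyn : ¬ y <= 0 := by omega
            simp only [hxn, hyn, if_false]
            have hhalf : (y + 1).toNat = (x + 1).toNat / 2 := by omega
            rw [hhalf]
            simp only [decide_eq_decide]
            exact closed_step (x + 1).toNat (by omega)

-- ===== VERDICT (by name: the statement is the Claim_ definition above) =====
theorem ricorsiva_spec : Claim_equal_ricorsiva := by
  intro x _
  unfold Spec_ricorsiva
  exact ricorsiva_eq x
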